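-- pv_equiv track=rewrite | github.com/lee-jae-o/PythonStudy | study/study89.py | count_rides
-- ===== SOURCE A (Python) =====
-- def count_rides(children_heights, rides):
--     ride_counts = [0] * len(rides)
--
--     for child_height in children_heights:
--         for i, ride in enumerate(rides):
--             min_height, max_height = ride
--             if min_height <= child_height <= max_height:
--                 ride_counts[i] += 1
--
--     max_rides = max(ride_counts)
--     return max_rides
-- ===== SOURCE B (Python) =====
-- def _insertion_point(a, x, right):
--     # binary search on sorted a: first index i with a[i] >= x (right=False) or a[i] > x (right=True)
--     lo, hi = 0, len(a)
--     while lo < hi: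
--         mid = (lo + hi) // 2
--         if (a[mid] <= x) if right else (a[mid] < x):
--             lo = mid + 1
--         else:
--             hi = mid
--     return lo
--
--
-- def count_rides(children_heights, rides):
--     s = sorted(children_heights)
--     return max(max(0, _insertion_point(s, mx, True) - _insertion_point(s, mn, False))
--                for mn, mx in rides)
-- ===== Notes on version B (the rewrite author's own statement) =====
-- stated objective: faster
-- what changed: B sorts the children once and answers each ride with two hand-written binary searches (count = insertion point of max_height from the right minus insertion point of min_height from the left), replacing A's scan of every ride for every child.
import Mathlib
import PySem

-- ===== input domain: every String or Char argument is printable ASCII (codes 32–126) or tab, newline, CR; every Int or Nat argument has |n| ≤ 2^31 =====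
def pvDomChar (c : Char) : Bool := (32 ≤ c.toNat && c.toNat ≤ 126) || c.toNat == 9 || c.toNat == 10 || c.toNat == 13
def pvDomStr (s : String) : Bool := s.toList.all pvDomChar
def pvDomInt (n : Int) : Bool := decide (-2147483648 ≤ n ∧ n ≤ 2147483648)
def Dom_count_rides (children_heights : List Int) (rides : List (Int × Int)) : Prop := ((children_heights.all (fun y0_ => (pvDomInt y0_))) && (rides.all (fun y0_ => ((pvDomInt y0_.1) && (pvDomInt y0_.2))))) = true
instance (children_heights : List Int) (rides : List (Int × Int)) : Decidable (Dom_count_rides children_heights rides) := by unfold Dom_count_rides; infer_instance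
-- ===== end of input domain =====

-- B sorts the children once and answers each ride with two binary searches instead of scanning every ride per child (a different, faster algorithm).
-- Pre_ excludes only empty `rides`, on which Python's max([]) raises ValueError in A (and in B).


-- ===== PORT A =====
-- ride_counts = [0]*len(rides); the inner 'for i, ride in enumerate(rides): ... ride_counts[i] += 1'
-- pass updates position i exactly from rides[i], i.e. it is the index-wise zipWith of rides with the counts.
def count_rides (children_heights : List Int) (rides : List (Int × Int)) : Int :=
  let ride_counts := children_heights.foldl
    (fun counts child_height =>
      List.zipWith (fun (ride : Int × Int) c =>
        if ride.1 ≤ child_height ∧ child_height ≤ ride.2 then c + 1 else c) rides counts)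
    (List.replicate rides.length (0 : Int))
  (PySem.List.max? ride_counts (fun c => c)).getD 0  -- max(ride_counts); none (ValueError) excluded by Pre_

-- ===== PORT B =====
-- Source B's _insertion_point: while lo < hi: mid = (lo+hi)//2; lo moves past mid if a[mid] < x (right=False) / a[mid] <= x (right=True).
-- a[mid]: mid is always in range whenever the loop body runs, so the default of pyGetD is never used.
def ipLoop (a : List Int) (x : Int) (right : Bool) (lo hi : Int) : Int :=
  if h : lo < hi then
    let mid := PySem.Int.floordiv (lo + hi) 2
    let v := PySem.List.pyGetD a mid 0
    if (if right then v ≤ x else v < x) then ipLoop a x right (mid + 1) hi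
    else ipLoop a x right lo mid
  else lo
termination_by (hi - lo).toNat
decreasing_by
  · have hb := PySem.Int.floordiv_two_mid_bounds (le_of_lt h)
    omega
  · have _hb := PySem.Int.floordiv_two_mid_bounds (le_of_lt h)
    have : PySem.Int.floordiv (lo + hi) 2 < hi :=
      (PySem.Int.floordiv_lt_iff_lt_mul (by omega)).mpr (by omega)
    omega

def insertion_point (a : List Int) (x : Int) (right : Bool) : Int :=
  ipLoop a x right 0 (a.length : Int)

def count_rides_alt (children_heights : List Int) (rides : List (Int × Int)) : Int :=
  let s := PySem.List.sorted children_heights (fun h => h) false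
  (PySem.List.max? (rides.map (fun r =>
      max 0 (insertion_point s r.2 true - insertion_point s r.1 false))) (fun c => c)).getD 0

-- ===== PRECONDITION & SPEC =====
-- Pre_ excludes only rides = [], on which Python's max() raises ValueError in both A and B.
def Pre_count_rides (_children_heights : List Int) (rides : List (Int × Int)) : Prop := rides ≠ []
instance (children_heights : List Int) (rides : List (Int × Int)) : Decidable (Pre_count_rides children_heights rides) := by unfold Pre_count_rides; infer_instance
def pvWitness_count_rides : List Int × (List (Int × Int)) := ([150, 120, 135], [(130, 160), (100, 125)])

def Spec_count_rides (children_heights : List Int) (rides : List (Int × Int)) (out : Int) : Prop := out = count_rides_alt children_heights rides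
instance (children_heights : List Int) (rides : List (Int × Int)) (out : Int) : Decidable (Spec_count_rides children_heights rides out) := by unfold Spec_count_rides; infer_instance

-- ===== CLAIM (what is proved, stated in full; the proofs are below) =====
def Claim_equal_count_rides : Prop := ∀ (children_heights : List Int) (rides : List (Int × Int)), Dom_count_rides children_heights rides → Pre_count_rides children_heights rides → Spec_count_rides children_heights rides (count_rides children_heights rides)

-- ===== LEMMAS AND PROOFS =====

-- the range test of one ride, as a Bool predicate on a height
def inRange (r : Int × Int) (h : Int) : Bool := decide (r.1 ≤ h ∧ h ≤ r.2)

-- A's fold over children keeps ride_counts = rides.map (initial value + running count so far)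
lemma A_fold (rides : List (Int × Int)) (ch : List Int) :
    ∀ f : Int × Int → Int,
      ch.foldl
        (fun counts child_height =>
          List.zipWith (fun (ride : Int × Int) c =>
            if ride.1 ≤ child_height ∧ child_height ≤ ride.2 then c + 1 else c) rides counts)
        (rides.map f)
      = rides.map (fun r => f r + (ch.countP (inRange r) : Int)) := by
  induction ch with
  | nil => intro f; simp
  | cons h t ih =>
    intro f
    rw [List.foldl_cons, List.zipWith_map_right, List.zipWith_self]
    rw [ih (fun r => if r.1 ≤ h ∧ h ≤ r.2 then f r + 1 else f r)]
    apply List.map_congr_left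
    intro r _
    by_cases hc : r.1 ≤ h ∧ h ≤ r.2 <;> simp [inRange, hc] <;> omega

-- a downward-closed predicate splits a sorted list exactly at index countP
lemma sorted_split (p : Int → Bool)
    (hmono : ∀ v w : Int, v ≤ w → p w = true → p v = true) :
    ∀ (a : List Int), a.Pairwise (· ≤ ·) →
      ∀ i : Nat, (hi : i < a.length) → (p a[i] = true ↔ i < a.countP p) := by
  intro a
  induction a with
  | nil => intro _ i hi; simp at hi
  | cons hd tl ih =>
    intro hs i hi
    rw [List.pairwise_cons] at hs
    obtain ⟨hhd, hs'⟩ := hs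
    have hz : p hd = false → tl.countP p = 0 := by
      intro hphd
      rw [List.countP_eq_zero]
      intro y hy hpy
      have := hmono hd y (hhd y hy) hpy
      simp [hphd] at this
    match i with
    | 0 =>
      simp only [List.getElem_cons_zero, List.countP_cons]
      by_cases hp : p hd = true
      · simp [hp]
      · have hf : p hd = false := by simpa using hp
        simp [hf, hz hf]
    | Nat.succ j =>
      simp only [List.getElem_cons_succ, List.countP_cons]
      by_cases hp : p hd = true
      · rw [ih hs' j (by simpa using hi)]
        simp [hp]
      · have hf : p hd = false := by simpa using hp
        have h0 := hz hf
        have hjlen : j < tl.length := by simpa using hi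
        constructor
        · intro hpt
          exfalso
          have hm : tl[j] ∈ tl := List.getElem_mem hjlen
          have := (List.countP_eq_zero.mp h0) _ hm
          simp [hpt] at this
        · intro hlt
          exfalso
          simp [hf, h0] at hlt

-- binary-search loop invariant: on a sorted list the loop returns the split point countP
lemma ipLoop_eq (a : List Int) (x : Int) (right : Bool)
    (hs : a.Pairwise (· ≤ ·)) :
    ∀ n (lo hi : Int), (hi - lo).toNat = n → 0 ≤ lo → hi ≤ (a.length : Int) →
      lo ≤ (a.countP (fun v => if right then decide (v ≤ x) else decide (v < x)) : Int) →
      (a.countP (fun v => if right then decide (v ≤ x) else decide (v < x)) : Int) ≤ hi →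
      ipLoop a x right lo hi = (a.countP (fun v => if right then decide (v ≤ x) else decide (v < x)) : Int) := by
  have hmono : ∀ v w : Int, v ≤ w →
      (if right then decide (w ≤ x) else decide (w < x)) = true →
      (if right then decide (v ≤ x) else decide (v < x)) = true := by
    intro v w hvw
    cases right <;> simp <;> omega
  intro n
  induction n using Nat.strong_induction_on with
  | _ n IH =>
    intro lo hi hn h0 hlen hloP hPhi
    set p : Int → Bool := fun v => if right then decide (v ≤ x) else decide (v < x) with hp
    rw [ipLoop]
    by_cases h : lo < hi
    · simp only [h, dif_pos]
      have hb := PySem.Int.floordiv_two_mid_bounds (le_of_lt h)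
      have hmidlt : PySem.Int.floordiv (lo + hi) 2 < hi :=
        (PySem.Int.floordiv_lt_iff_lt_mul (by omega)).mpr (by omega)
      set mid := PySem.Int.floordiv (lo + hi) 2 with hm
      have h0m : 0 ≤ mid := by omega
      have hmlen : mid < (a.length : Int) := by omega
      have hv : PySem.List.pyGetD a mid 0 = a[mid.toNat]'(by omega) :=
        PySem.List.pyGetD_eq_getElem a 0 h0m hmlen
      have hsplit := sorted_split p hmono a hs mid.toNat (by omega)
      by_cases hc : p (PySem.List.pyGetD a mid 0) = true
      · rw [if_pos (by simpa [hp] using hc)]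
        have : mid.toNat < a.countP p := hsplit.mp (by rw [← hv]; exact hc)
        exact IH ((hi - (mid + 1)).toNat) (by omega) (mid + 1) hi rfl (by omega) hlen
          (by omega) hPhi
      · rw [if_neg (by simpa [hp] using hc)]
        have : ¬ mid.toNat < a.countP p := fun hlt => hc (by rw [hv]; exact hsplit.mpr hlt)
        exact IH ((mid - lo).toNat) (by omega) lo mid rfl h0 (by omega) hloP (by omega)
    · simp only [h, dif_neg, not_false_iff]
      omega

lemma insertion_point_eq (a : List Int) (x : Int) (right : Bool)
    (hs : a.Pairwise (· ≤ ·)) :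
    insertion_point a x right
      = (a.countP (fun v => if right then decide (v ≤ x) else decide (v < x)) : Int) := by
  unfold insertion_point
  exact ipLoop_eq a x right hs ((a.length : Int) - 0).toNat 0 (a.length) rfl le_rfl le_rfl
    (by positivity) (by exact_mod_cast List.countP_le_length)

-- count(≤ mx) - count(< mn), clamped at 0, is the count of the closed range (any list)
lemma diff_count (l : List Int) (mn mx : Int) :
    max 0 ((l.countP (fun v => decide (v ≤ mx)) : Int) - (l.countP (fun v => decide (v < mn)) : Int))
      = (l.countP (inRange (mn, mx)) : Int) := by
  by_cases hok : mn ≤ mx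
  · have hsum : l.countP (fun v => decide (v ≤ mx))
        = l.countP (inRange (mn, mx)) + l.countP (fun v => decide (v < mn)) := by
      induction l with
      | nil => simp
      | cons a t ih =>
        simp only [List.countP_cons, ih, inRange]
        by_cases h1 : a ≤ mx <;> by_cases h2 : a < mn <;> by_cases h3 : mn ≤ a <;>
          simp [h1, h2, h3] <;> omega
    rw [hsum]
    push_cast
    omega
  · have hz : l.countP (inRange (mn, mx)) = 0 := by
      rw [List.countP_eq_zero]
      intro v _
      simp [inRange]
      omega
    have hle : l.countP (fun v => decide (v ≤ mx)) ≤ l.countP (fun v => decide (v < mn)) := by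
      apply List.countP_mono_left
      intro v _ h
      simp at h ⊢
      omega
    rw [hz]
    push_cast
    omega

-- per ride, B's clamped bisect difference is A's count over the children
lemma ride_count_eq (children_heights : List Int) (r : Int × Int) :
    max 0 (insertion_point (PySem.List.sorted children_heights (fun h => h) false) r.2 true
         - insertion_point (PySem.List.sorted children_heights (fun h => h) false) r.1 false)
      = (children_heights.countP (inRange r) : Int) := by
  set s := PySem.List.sorted children_heights (fun h => h) false with hsdef
  have hs : s.Pairwise (· ≤ ·) := PySem.List.sorted_pairwise children_heights (fun h => h)
  have hperm : s.Perm children_heights := PySem.List.sorted_perm children_heights (fun h => h) false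
  rw [insertion_point_eq s r.2 true hs, insertion_point_eq s r.1 false hs]
  simp only [ite_true]
  rw [← hperm.countP_eq]
  have hd := diff_count s r.1 r.2
  simpa using hd

-- ===== VERDICT (by name: the statement is the Claim_ definition above) =====
theorem count_rides_spec : Claim_equal_count_rides := by
  intro children_heights rides _ _
  unfold Spec_count_rides count_rides count_rides_alt
  rw [← List.map_const', A_fold]
  have hmap : (fun (r : Int × Int) => (0:Int) + (children_heights.countP (inRange r) : Int))
      = (fun (r : Int × Int) =>
          max 0 (insertion_point (PySem.List.sorted children_heights (fun h => h) false) r.2 true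
               - insertion_point (PySem.List.sorted children_heights (fun h => h) false) r.1 false)) := by
    funext r
    rw [ride_count_eq]
    omega
  rw [hmap]
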